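-- pv_equiv track=rewrite | github.com/ankpandey1/reversi | reversi.py | validPlayLeftDown
-- ===== SOURCE A (Python) =====
-- def getCurrentPlayer(player):
--     if(player == "W"):
--         return "W"
--     else:
--         return "B"
--
-- def getOpponent(player):
--     if(player == "W"):
--         return "B"
--     else:
--         return "W"
--
-- def validPlayLeftDown(pos, board, player):
--     isOpponent = False
--     isYours = False
--
--     while True:
--         if isOpponent and isYours:
--             return True
--         elif ((pos + 7) % 8 == 7) or ((pos + 7) > 63):
--             return False
--         elif (board[(pos + 7)] == getOpponent(player)) and (not isOpponent):
--             pos = pos + 7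
--             isOpponent = True
--         elif (board[(pos + 7)] == getOpponent(player)) and isOpponent:
--             pos = pos + 7
--         elif (board[(pos + 7)] == getCurrentPlayer(player)) and (not isYours) and isOpponent:
--             pos = pos + 7
--             isYours = True
--         else:
--             return False
-- ===== SOURCE B (Python) =====
-- def getCurrentPlayer(player):
--     if(player == "W"):
--         return "W"
--     else:
--         return "B"
--
-- def getOpponent(player):
--     if(player == "W"):
--         return "B"
--     else:
--         return "W"
--
-- def validPlayLeftDown(pos, board, player):
--     # Pass 1: collect the cells along the down-left diagonal.
--     cells = []
--     p = pos
--     while not (p % 8 == 0 or p + 7 > 63):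
--         p += 7
--         cells.append(board[p])
--     # Pass 2: consume the leading run of opponent cells, then require own cell.
--     opp = getOpponent(player)
--     cur = getCurrentPlayer(player)
--     i = 0
--     while i < len(cells) and cells[i] == opp:
--         i += 1
--     return 0 < i < len(cells) and cells[i] == cur
-- ===== Notes on version B (the rewrite author's own statement) =====
-- stated objective: simpler
-- what changed: Replaces A's single state-machine loop over two boolean flags by two independent passes: first collect the down-left diagonal cells into a list, then scan that list once, consuming the leading run of opponent cells and requiring the next cell to be the player's own.
-- outside the precondition, e.g. on validPlayLeftDown(-2, ['E', 'E', 'E', 'E', 'E', 'E'], 'W'): A returns False, B raises IndexError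
import Mathlib
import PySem

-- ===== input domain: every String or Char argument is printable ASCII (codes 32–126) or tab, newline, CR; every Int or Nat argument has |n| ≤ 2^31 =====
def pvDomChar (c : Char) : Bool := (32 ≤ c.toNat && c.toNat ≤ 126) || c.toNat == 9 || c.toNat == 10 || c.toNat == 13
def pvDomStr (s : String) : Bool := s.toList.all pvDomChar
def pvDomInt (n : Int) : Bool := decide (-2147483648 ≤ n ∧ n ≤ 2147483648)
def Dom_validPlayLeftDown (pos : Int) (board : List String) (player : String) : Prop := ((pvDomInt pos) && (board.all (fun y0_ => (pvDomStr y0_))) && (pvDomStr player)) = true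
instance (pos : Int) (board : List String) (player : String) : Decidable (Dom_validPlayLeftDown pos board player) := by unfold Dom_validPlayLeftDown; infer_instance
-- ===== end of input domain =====

-- B replaces A's flag-driven state-machine loop by two passes (collect the down-left
-- diagonal, then scan its leading opponent run); same cost, chosen for simplicity.


-- ===== PORT A =====
def pvGCP (player : String) : String := if player = "W" then "W" else "B"

def pvGOP (player : String) : String := if player = "W" then "B" else "W"

-- A's `while True` loop; `board[pos+7]` is `(pyGet? …).getD ""` — Python raises exactly
-- where pyGet? is none, and those inputs are excluded by Pre_ below.
def pvLoopA (pos : Int) (board : List String) (player : String) (isOpponent : Bool) (isYours : Bool) : Bool :=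
  if isOpponent && isYours then true
  else if PySem.Int.mod (pos + 7) 8 = 7 ∨ pos + 7 > 63 then false
  else if ((PySem.List.pyGet? board (pos + 7)).getD "" = pvGOP player) ∧ isOpponent = false then
    pvLoopA (pos + 7) board player true isYours
  else if ((PySem.List.pyGet? board (pos + 7)).getD "" = pvGOP player) ∧ isOpponent = true then
    pvLoopA (pos + 7) board player isOpponent isYours
  else if ((PySem.List.pyGet? board (pos + 7)).getD "" = pvGCP player) ∧ isYours = false ∧ isOpponent = true then
    pvLoopA (pos + 7) board player isOpponent true
  else false
termination_by (63 - pos).toNat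
decreasing_by all_goals omega

def validPlayLeftDown (pos : Int) (board : List String) (player : String) : Bool :=
  pvLoopA pos board player false false

-- ===== PORT B =====
-- Pass 1 of Source B: collect the cells along the down-left diagonal.
def pvDiagLD (p : Int) (board : List String) : List String :=
  if PySem.Int.mod p 8 = 0 ∨ p + 7 > 63 then []
  else ((PySem.List.pyGet? board (p + 7)).getD "") :: pvDiagLD (p + 7) board
termination_by (63 - p).toNat
decreasing_by omega

-- Pass 2 of Source B: the index after the leading run of opponent cells.
def pvLeadRun (cells : List String) (opp : String) : Nat :=
  match cells with
  | [] => 0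
  | c :: rest => if c = opp then pvLeadRun rest opp + 1 else 0

def validPlayLeftDown_alt (pos : Int) (board : List String) (player : String) : Bool :=
  let cells := pvDiagLD pos board
  let opp := pvGOP player
  let cur := pvGCP player
  let i := pvLeadRun cells opp
  decide (0 < i) && decide (i < cells.length) && (cells.getD i "" == cur)

-- ===== PRECONDITION & SPEC =====
-- Pre_ excludes inputs whose down-left diagonal can run past the stored board (fewer than
-- 64 cells, or a start so far negative that indexing leaves range): there Python A may raise
-- IndexError or return via an early exit while B's eager collection raises IndexError.
def Pre_validPlayLeftDown (pos : Int) (board : List String) (player : String) : Prop :=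
  PySem.Int.mod pos 8 = 0 ∨ 63 < pos + 7 ∨ (64 ≤ (board.length : Int) ∧ -(board.length : Int) ≤ pos + 7)

instance (pos : Int) (board : List String) (player : String) : Decidable (Pre_validPlayLeftDown pos board player) := by
  unfold Pre_validPlayLeftDown; infer_instance

def pvWitness_validPlayLeftDown : Int × List String × String := (10, List.replicate 64 "E", "W")

def Spec_validPlayLeftDown (pos : Int) (board : List String) (player : String) (out : Bool) : Prop := out = validPlayLeftDown_alt pos board player
instance (pos : Int) (board : List String) (player : String) (out : Bool) : Decidable (Spec_validPlayLeftDown pos board player out) := by unfold Spec_validPlayLeftDown; infer_instance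

-- ===== CLAIM (what is proved, stated in full; the proofs are below) =====
def Claim_equal_validPlayLeftDown : Prop := ∀ (pos : Int) (board : List String) (player : String), Dom_validPlayLeftDown pos board player → Pre_validPlayLeftDown pos board player → Spec_validPlayLeftDown pos board player (validPlayLeftDown pos board player)

-- ===== LEMMAS AND PROOFS =====

-- Proof-side scanner: B's second pass written as structural recursion with an
-- "already saw an opponent cell" flag, mirroring A's isOpponent flag.
def pvScan (cells : List String) (opp cur : String) (sawOpp : Bool) : Bool :=
  match cells with
  | [] => false
  | c :: rest => if c = opp then pvScan rest opp cur true else sawOpp && decide (c = cur)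

lemma pv_edge_iff (pos : Int) :
    (PySem.Int.mod (pos + 7) 8 = 7 ∨ pos + 7 > 63) ↔ (PySem.Int.mod pos 8 = 0 ∨ pos + 7 > 63) := by
  simp only [PySem.Int.mod_eq_emod_of_pos (show (0:Int) < 8 by norm_num)]
  omega

lemma pv_loopA_eq_scan (board : List String) (player : String) :
    ∀ n (pos : Int), (63 - pos).toNat ≤ n → ∀ sawOpp,
      pvLoopA pos board player sawOpp false
        = pvScan (pvDiagLD pos board) (pvGOP player) (pvGCP player) sawOpp := by
  intro n
  induction n with
  | zero =>
    intro pos h sawOpp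
    have hedge : pos + 7 > 63 := by omega
    rw [pvLoopA, pvDiagLD]
    simp [hedge, pvScan]
  | succ n ih =>
    intro pos h sawOpp
    by_cases hedge : PySem.Int.mod (pos + 7) 8 = 7 ∨ pos + 7 > 63
    · have hedge' : PySem.Int.mod pos 8 = 0 ∨ pos + 7 > 63 := (pv_edge_iff pos).mp hedge
      rw [pvLoopA, pvDiagLD, if_pos hedge',
          if_neg (show ¬(sawOpp && false) = true by simp), if_pos hedge]
      simp [pvScan]
    · have hedge' : ¬ (PySem.Int.mod pos 8 = 0 ∨ pos + 7 > 63) :=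
        fun hx => hedge ((pv_edge_iff pos).mpr hx)
      have hle : pos + 7 ≤ 63 := by
        by_contra hc; exact hedge (Or.inr (by omega))
      have hn : (63 - (pos + 7)).toNat ≤ n := by omega
      rw [pvLoopA, pvDiagLD, if_neg hedge',
          if_neg (show ¬(sawOpp && false) = true by simp), if_neg hedge]
      set c := (PySem.List.pyGet? board (pos + 7)).getD "" with hc
      by_cases hopp : c = pvGOP player
      · -- an opponent cell: both sides continue with the flag set
        have hRHS : pvScan (c :: pvDiagLD (pos + 7) board) (pvGOP player) (pvGCP player) sawOpp
            = pvScan (pvDiagLD (pos + 7) board) (pvGOP player) (pvGCP player) true := by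
          simp only [pvScan]; rw [if_pos hopp]
        rw [hRHS]
        cases sawOpp with
        | false =>
          rw [if_pos (show c = pvGOP player ∧ false = false from ⟨hopp, rfl⟩)]
          exact ih (pos + 7) hn true
        | true =>
          rw [if_neg (show ¬(c = pvGOP player ∧ true = false) by simp),
              if_pos (show c = pvGOP player ∧ true = true from ⟨hopp, rfl⟩)]
          exact ih (pos + 7) hn true
      · by_cases hcur : c = pvGCP player ∧ sawOpp = true
        · -- own cell after at least one opponent: A returns true on its next iteration
          obtain ⟨hc1, hs⟩ := hcur
          subst hs
          rw [if_neg (show ¬(c = pvGOP player ∧ true = false) by simp),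
              if_neg (fun hx => hopp hx.1),
              if_pos (show c = pvGCP player ∧ false = false ∧ true = true from ⟨hc1, rfl, rfl⟩)]
          have hA : pvLoopA (pos + 7) board player true true = true := by
            rw [pvLoopA]; simp
          rw [hA]
          simp only [pvScan]
          rw [if_neg hopp]
          simp [hc1]
        · -- neither opponent nor a capturing own cell: both return false
          rw [if_neg (fun hx => hopp hx.1), if_neg (fun hx => hopp hx.1),
              if_neg (fun hx => hcur ⟨hx.1, hx.2.2⟩)]
          simp only [pvScan]
          rw [if_neg hopp]
          rcases Bool.eq_false_or_eq_true sawOpp with hs | hs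
          · have hnc : ¬ c = pvGCP player := fun hx => hcur ⟨hx, hs⟩
            simp [hs, hnc]
          · simp [hs]

lemma pv_scan_true (cells : List String) (opp cur : String) :
    pvScan cells opp cur true
      = (decide (pvLeadRun cells opp < cells.length) && (cells.getD (pvLeadRun cells opp) "" == cur)) := by
  induction cells with
  | nil => simp [pvScan, pvLeadRun]
  | cons c rest ih =>
    by_cases hopp : c = opp
    · simp [pvScan, pvLeadRun, hopp, ih]
    · simp only [pvScan, pvLeadRun, if_neg hopp, List.getD, Bool.true_and]
      rcases eq_or_ne c cur with h | h <;> simp [h]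

lemma pv_scan_false (cells : List String) (opp cur : String) :
    pvScan cells opp cur false
      = (decide (0 < pvLeadRun cells opp) && decide (pvLeadRun cells opp < cells.length)
          && (cells.getD (pvLeadRun cells opp) "" == cur)) := by
  cases cells with
  | nil => simp [pvScan, pvLeadRun]
  | cons c rest =>
    by_cases hopp : c = opp
    · simp [pvScan, pvLeadRun, hopp, pv_scan_true]
    · simp [pvScan, pvLeadRun, hopp]

-- ===== VERDICT (by name: the statement is the Claim_ definition above) =====
theorem validPlayLeftDown_spec : Claim_equal_validPlayLeftDown := by
  intro pos board player _ _
  unfold Spec_validPlayLeftDown validPlayLeftDown validPlayLeftDown_alt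
  rw [pv_loopA_eq_scan board player (63 - pos).toNat pos (le_refl _) false]
  exact pv_scan_false _ _ _
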